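-- pv_equiv track=rewrite | github.com/TheSechas/Python | eval3/repasoexamen/4.py | incrementar_letras
-- ===== SOURCE A (Python) =====
-- letras_validas = "BCDFGHJKLMNPQRSTVWXYZ"
--
-- def incrementar_letras(letras):
--     # Convierte la cadena de letras en una lista para modificar individualmente
--     letras = list(letras)
--     carry = True
--     # Itera sobre las letras desde la última a la primera
--     for i in range(2, -1, -1):
--         if carry:
--             idx = letras_validas.index(letras[i])
--             if idx == len(letras_validas) - 1:
--                 # Si la letra actual es la última en letras_validas, la cambia a la primera letra
--                 letras[i] = letras_validas[0]
--                 carry = True  # Continúa el carry a la siguiente posición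
--             else:
--                 # Si no es la última, incrementa a la siguiente letra y para el carry
--                 letras[i] = letras_validas[idx + 1]
--                 carry = False
--         else:
--             break
--     return ''.join(letras)
-- ===== SOURCE B (Python) =====
-- letras_validas = "BCDFGHJKLMNPQRSTVWXYZ"
--
-- def incrementar_letras(letras):
--     # Closed-form increment: a carry chain is exactly "rewrite the trailing run of
--     # last-letters to the first letter and bump the letter just before the run".
--     head = letras[:3]
--     stripped = head.rstrip(letras_validas[-1])  # drop the trailing run of 'Z's
--     t = 3 - len(stripped)
--     if t == 3:
--         return letras_validas[0] * 3 + letras[3:]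
--     nxt = letras_validas[letras_validas.index(stripped[-1]) + 1]
--     return stripped[:-1] + nxt + letras_validas[0] * t + letras[3:]
-- ===== Notes on version B (the rewrite author's own statement) =====
-- stated objective: simpler
-- what changed: Replaces the right-to-left carry loop with mutable list state and carry flag by a closed form: rstrip the trailing run of 'Z's from letras[:3], bump the letter just before the run via one index lookup, and pad with 'B's.
import Mathlib
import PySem

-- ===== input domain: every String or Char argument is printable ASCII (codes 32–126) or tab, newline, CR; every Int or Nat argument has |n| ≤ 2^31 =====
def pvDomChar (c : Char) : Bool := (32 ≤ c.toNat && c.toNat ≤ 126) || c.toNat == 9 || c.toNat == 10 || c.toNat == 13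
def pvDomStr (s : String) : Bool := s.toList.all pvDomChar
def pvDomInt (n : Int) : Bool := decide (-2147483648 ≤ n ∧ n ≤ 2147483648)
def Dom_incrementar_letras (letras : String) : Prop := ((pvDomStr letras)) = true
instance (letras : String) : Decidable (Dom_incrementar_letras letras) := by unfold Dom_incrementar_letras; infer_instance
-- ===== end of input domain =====

-- B replaces A's right-to-left carry loop by a closed form (strip the trailing run of
-- 'Z's, bump the letter just before it, pad with 'B's); objective: simpler. Return
-- values only (A's list(…) copy makes its mutation unobservable anyway).

-- ===== PORT A =====
def pvLV : List Char := "BCDFGHJKLMNPQRSTVWXYZ".toList   -- letras_validas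

-- one iteration of A's 'for i in range(2, -1, -1)' body (the carry=false branch is a
-- no-op: Python's 'break' just leaves the remaining state unchanged)
def pvStepA (st : List Char × Bool) (i : Int) : List Char × Bool :=
  if st.2 then
    match PySem.List.index? pvLV (PySem.List.pyGetD st.1 i ' ') with
    | none => st  -- ValueError: excluded by Pre_
    | some idx =>
      if idx = pvLV.length - 1 then
        (PySem.List.pySetD st.1 i (PySem.List.pyGetD pvLV 0 ' '), true)
      else
        (PySem.List.pySetD st.1 i (PySem.List.pyGetD pvLV ((idx : Int) + 1) ' '), false)
  else st

def incrementar_letras (letras : String) : String :=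
  String.ofList ((PySem.List.pyRange 2 (-1) (-1)).foldl pvStepA (letras.toList, true)).1

-- ===== PORT B =====
def incrementar_letras_alt (letras : String) : String :=
  let head := PySem.List.slice letras.toList none (some 3)            -- letras[:3]
  let stripped := (head.reverse.dropWhile (fun c => c = 'Z')).reverse -- head.rstrip('Z'); exact: the strip set is the single char 'Z'
  let t := 3 - stripped.length
  let rest := PySem.List.slice letras.toList (some 3) none            -- letras[3:]
  if t = 3 then String.ofList (['B', 'B', 'B'] ++ rest)
  else
    match PySem.List.pyGet? stripped (-1) with
    | none => ""  -- unreachable: t < 3 means stripped is nonempty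
    | some c =>
      match PySem.List.index? pvLV c with
      | none => ""  -- ValueError: excluded by Pre_
      | some idx =>
        String.ofList (PySem.List.slice stripped none (some (-1)) ++
          [PySem.List.pyGetD pvLV ((idx : Int) + 1) ' '] ++ List.replicate t 'B' ++ rest)

-- ===== PRECONDITION & SPEC =====
-- Pre_ = exactly the inputs on which A returns: at least 3 characters, and every letter
-- the carry chain actually visits is in letras_validas (otherwise A raises
-- IndexError/ValueError; positions the chain never reaches may hold anything).
def Pre_incrementar_letras (letras : String) : Prop :=
  3 ≤ letras.toList.length ∧ letras.toList.getD 2 ' ' ∈ pvLV ∧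
    (letras.toList.getD 2 ' ' = 'Z' →
      letras.toList.getD 1 ' ' ∈ pvLV ∧
        (letras.toList.getD 1 ' ' = 'Z' → letras.toList.getD 0 ' ' ∈ pvLV))
instance (letras : String) : Decidable (Pre_incrementar_letras letras) := by
  unfold Pre_incrementar_letras; infer_instance

def pvWitness_incrementar_letras : String := "BZZ"

def Spec_incrementar_letras (letras : String) (out : String) : Prop := out = incrementar_letras_alt letras
instance (letras : String) (out : String) : Decidable (Spec_incrementar_letras letras out) := by unfold Spec_incrementar_letras; infer_instance

-- ===== CLAIM (what is proved, stated in full; the proofs are below) =====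
def Claim_equal_incrementar_letras : Prop := ∀ (letras : String), Dom_incrementar_letras letras → Pre_incrementar_letras letras → Spec_incrementar_letras letras (incrementar_letras letras)

-- ===== LEMMAS AND PROOFS =====
theorem pvLV_length : pvLV.length = 21 := by decide

-- a member of letras_validas other than 'Z' has an index ≠ 20
theorem pv_index_ne_20 {c : Char} (hc : c ∈ pvLV) (hz : c ≠ 'Z') :
    ∃ i, PySem.List.index? pvLV c = some i ∧ i ≠ 20 := by
  obtain ⟨i, hi⟩ := Option.isSome_iff_exists.mp ((PySem.List.index?_isSome_iff pvLV c).mpr hc)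
  refine ⟨i, hi, ?_⟩
  rintro rfl
  obtain ⟨hk, hget, -⟩ := PySem.List.getElem_of_index?_eq_some hi
  have h1 : pvLV[(20 : Nat)]? = some 'Z' := by decide
  rw [List.getElem?_eq_getElem hk, hget] at h1
  exact hz (Option.some_injective _ h1)

theorem pvStepA_false (ls : List Char) (i : Int) : pvStepA (ls, false) i = (ls, false) := by
  unfold pvStepA; simp

theorem pvIndexZ : PySem.List.index? pvLV 'Z' = some 20 := by decide

theorem pvGetLV0 : PySem.List.pyGetD pvLV 0 ' ' = 'B' := by decide

theorem pvRange210 : PySem.List.pyRange 2 (-1) (-1) = [2, 1, 0] := by decide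

-- ===== VERDICT (by name: the statement is the Claim_ definition above) =====
set_option maxHeartbeats 4000000 in
theorem incrementar_letras_spec : Claim_equal_incrementar_letras := by
  intro letras _ hpre
  unfold Spec_incrementar_letras
  obtain ⟨hlen, hc2, hrest⟩ := hpre
  match hl : letras.toList with
  | [] => simp [hl] at hlen
  | [c0] => simp [hl] at hlen
  | [c0, c1] => simp [hl] at hlen
  | c0 :: c1 :: c2 :: rest =>
    rw [hl] at hc2 hrest
    simp only [List.getD_cons_succ, List.getD_cons_zero] at hc2 hrest
    unfold incrementar_letras incrementar_letras_alt
    rw [hl, pvRange210]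
    by_cases hz2 : c2 = 'Z'
    · subst hz2
      obtain ⟨hc1, hrest1⟩ := hrest rfl
      have h2 : pvStepA (c0 :: c1 :: 'Z' :: rest, true) 2 = (c0 :: c1 :: 'B' :: rest, true) := by
        unfold pvStepA
        have hg : PySem.List.pyGetD (c0 :: c1 :: 'Z' :: rest) 2 ' ' = 'Z' := by simp [pysem]
        rw [hg, pvIndexZ, pvGetLV0]
        simp [pvLV_length, pysem]
      by_cases hz1 : c1 = 'Z'
      · subst hz1
        have hc0 := hrest1 rfl
        have h1 : pvStepA (c0 :: 'Z' :: 'B' :: rest, true) 1 = (c0 :: 'B' :: 'B' :: rest, true) := by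
          unfold pvStepA
          have hg : PySem.List.pyGetD (c0 :: 'Z' :: 'B' :: rest) 1 ' ' = 'Z' := by simp [pysem]
          rw [hg, pvIndexZ]
          simp [pvLV_length, pysem]
          decide
        by_cases hz0 : c0 = 'Z'
        · subst hz0
          have h0 : pvStepA ('Z' :: 'B' :: 'B' :: rest, true) 0 = ('B' :: 'B' :: 'B' :: rest, true) := by
            unfold pvStepA
            have hg : PySem.List.pyGetD ('Z' :: 'B' :: 'B' :: rest) 0 ' ' = 'Z' := by simp [pysem]
            rw [hg, pvIndexZ]
            simp [pvLV_length, pysem]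
            decide
          simp only [List.foldl, h2, h1, h0]
          simp [pysem]
        · obtain ⟨i0, hi0, hne0⟩ := pv_index_ne_20 hc0 hz0
          have h0 : pvStepA (c0 :: 'B' :: 'B' :: rest, true) 0 =
              ((PySem.List.pyGetD pvLV ((i0 : Int) + 1) ' ') :: 'B' :: 'B' :: rest, false) := by
            unfold pvStepA
            have hg : PySem.List.pyGetD (c0 :: 'B' :: 'B' :: rest) 0 ' ' = c0 := by simp [pysem]
            rw [hg, hi0]
            simp [pvLV_length, hne0, pysem]
          simp only [List.foldl, h2, h1, h0]
          simp [pysem, hz0]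
          rw [PySem.List.index?_eq_idxOf?] at hi0
          rw [hi0]
      · obtain ⟨i1, hi1, hne1⟩ := pv_index_ne_20 hc1 hz1
        have h1 : pvStepA (c0 :: c1 :: 'B' :: rest, true) 1 =
            (c0 :: (PySem.List.pyGetD pvLV ((i1 : Int) + 1) ' ') :: 'B' :: rest, false) := by
          unfold pvStepA
          have hg : PySem.List.pyGetD (c0 :: c1 :: 'B' :: rest) 1 ' ' = c1 := by simp [pysem]
          rw [hg, hi1]
          simp [pvLV_length, hne1, pysem]
        simp only [List.foldl, h2, h1, pvStepA_false]
        simp [pysem, hz1]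
        rw [PySem.List.index?_eq_idxOf?] at hi1
        rw [hi1]
    · obtain ⟨i2, hi2, hne2⟩ := pv_index_ne_20 hc2 hz2
      have h2 : pvStepA (c0 :: c1 :: c2 :: rest, true) 2 =
          (c0 :: c1 :: (PySem.List.pyGetD pvLV ((i2 : Int) + 1) ' ') :: rest, false) := by
        unfold pvStepA
        have hg : PySem.List.pyGetD (c0 :: c1 :: c2 :: rest) 2 ' ' = c2 := by simp [pysem]
        rw [hg, hi2]
        simp [pvLV_length, hne2, pysem]
      simp only [List.foldl, h2, pvStepA_false]
      simp [pysem, hz2]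
      rw [PySem.List.index?_eq_idxOf?] at hi2
      rw [hi2]
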